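/- GENERATED by tools/from_farm_form.py from prooffarm-gif/accepted/DGifGetImageHeader.3/Lemmas.lean (a worked proof of the farm's unit `DGifGetImageHeader.3`,
   accepted by the verdict) — do not edit. -/
import Gif.Spec.Units.DGifGetImageHeader_3
import Gif.Spec.AllSegs

open X86 X86.User Asan ProgX.Base ProgX.Base.Spec Gif.Spec

set_option maxRecDepth 4000
set_option maxHeartbeats 4000000

namespace Gif.Spec.DGifGetImageHeader_3

/-- The address 108F47H (`cmp BYTE PTR [rsp+0x30], 0`, dgif_lib.c:393): the joint of "no previous map" and "the previous map freed". -/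
abbrev dgih3_at_108f47 : Word := 0x108f47

/-- **At 108F47H** (`cmp BYTE PTR [rsp+0x30], 0`, dgif_lib.c:393), the joint of "there was no previous map" and "the previous map was
freed and the field nulled": `Mid` for the present heap and forest, the forest has NO image colour map, `r13 = BitsPerPixel` (1 … 8, a
zero-extended 32-bit value). The flag byte is still in `Buf[0]` = `[rsp+0x30]`: any byte. -/
structure dgih3_AtFlag (H : Heap) (rest : List Obj) (frames : List (Nat × FrameLayout)) (F : Forest) (R : Rd)
    (Hc : Heap) (Fc : Forest) (u₀ e : State) (ret : Word) (v : State) : Prop where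
  mid : DGifGetImageHeader.Mid dgih3_at_108f47 H rest frames F R Hc Fc u₀ e ret v
  /-- no image colour map: `gif.Image.ColorMap = NULL` -/
  icm : Fc.icm = none
  /-- `BitsPerPixel = (Buf[0] & 7) + 1` -/
  r13 : 1 ≤ (v.reg .r13).toNat ∧ (v.reg .r13).toNat ≤ 8

/-- **`Body` THROUGH A PIECE OF THIS SEGMENT**: `v` has `Body` (for the heap `Hc`, the forest `Fc`), `s` is a later state with the
body's stack pointer, `rbx`, `rbp`; every window written since lies in the function's stack below the body's `rsp` or in the
contract's window `[800000H, 1000020H)` (the heap's region and the shadow). The slots and the footprint are carried; the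
invariants of the exit state (for the heap `Hc'`, the forest `Fc'`) are hypotheses. -/
theorem dgih3_body_carry {cut cut' : Word} {H : Heap} {rest : List Obj} {frames : List (Nat × FrameLayout)} {F : Forest} {R : Rd}
    {Hc Hc' : Heap} {Fc Fc' : Forest} {u₀ e : State} {ret : Word} {v s : State}
    (hb : DGifGetImageHeader.Body cut H rest frames F R Hc Fc u₀ e ret v)
    (hrip : s.rip = cut') (hrsp : s.reg .rsp = e.reg .rsp - 136)
    (hrbx : s.reg .rbx = v.reg .rbx) (hrbp : s.reg .rbp = v.reg .rbp)
    (hcode : (conv u₀).code.In s.mem) (habi : (conv u₀).inv s)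
    {ws : List Span} (hs : Mem.SameExcept ws v.mem s.mem)
    (hws : ∀ w, w ∈ ws → ((e.reg .rsp).toNat - 448 ≤ w.lo ∧ w.hi ≤ (e.reg .rsp).toNat - 136) ∨
      (0x800000 ≤ w.lo ∧ w.hi ≤ 0x1000020))
    (hinv : HeapInv Hc' rest (DGifGetImageHeader.framesIn frames e) ((e.reg .rsp).toNat - 136) s.mem)
    (hreg : SameRegion H Hc') (hfor : F.SameButIcm Fc') (hok : GifOK Hc' Fc' R s.mem)
    (hrem : rem R s.mem ≤ rem R v.mem) :
    DGifGetImageHeader.Body cut' H rest frames F R Hc' Fc' u₀ e ret s := by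
  have hroom : 0x700000 + 448 ≤ (e.reg .rsp).toNat := hb.entry.room
  have htop : (e.reg .rsp).toNat + 8 ≤ 0x800000 := hb.entry.top
  -- a slot `[RA − off, RA − off + 8)`, `off ≤ 48`, is missed by every window
  have hslot : ∀ (off x : Nat), off ≤ 48 → 8 ≤ off → v.mem.readLE (e.reg .rsp - UInt64.ofNat off) 8 = x →
      s.mem.readLE (e.reg .rsp - UInt64.ofNat off) 8 = x := by
    intro off x h1 h2 h
    apply slot_sameExcept hs (e.reg .rsp) off 8 x (by omega) h2 h
    intro w hw
    rcases hws w hw with ⟨a, b⟩ | ⟨a, b⟩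
    · right
      omega
    · left
      omega
  refine {
    entry := hb.entry
    pre := hb.pre
    rip := hrip
    rsp := hrsp
    rbx := hrbx.trans hb.rbx
    rbp := hrbp.trans hb.rbp
    slot_r15 := hslot 8 _ (by omega) (by omega) hb.slot_r15
    slot_r14 := hslot 16 _ (by omega) (by omega) hb.slot_r14
    slot_r13 := hslot 24 _ (by omega) (by omega) hb.slot_r13
    slot_r12 := hslot 32 _ (by omega) (by omega) hb.slot_r12
    slot_rbp := hslot 40 _ (by omega) (by omega) hb.slot_rbp
    slot_rbx := hslot 48 _ (by omega) (by omega) hb.slot_rbx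
    slot_ra := ?_
    inv := hinv
    region := hreg
    forest := hfor
    ok := hok
    rem := Nat.le_trans hrem hb.rem
    same := ?_
    code := hcode
    abi := habi
  }
  · have hlt := (e.reg .rsp).toNat_lt
    rw [hs.readLE (e.reg .rsp) 8 (by omega) ?_]
    · exact hb.slot_ra
    · intro w hw
      rcases hws w hw with ⟨a, b⟩ | ⟨a, b⟩
      · right
        omega
      · left
        omega
  · apply hb.same.step_same hs
    intro w hw a h1 h2
    rcases hws w hw with ⟨c, d⟩ | ⟨c, d⟩
    · refine ⟨⟨(e.reg .rsp).toNat - 448, (e.reg .rsp).toNat⟩, List.mem_cons_self, ?_, ?_⟩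
      · simp only
        omega
      · simp only
        omega
    · refine ⟨⟨0x800000, 0x1000020⟩, List.mem_cons_of_mem _ (List.mem_cons_of_mem _ List.mem_cons_self), ?_, ?_⟩
      · simp only
        omega
      · simp only
        omega

/-- **108EF8H … 108F47H, no previous map** (dgif_lib.c:384-388): `r13d = (Buf[0] & 7) + 1`, the checked byte store of `Interlace`
(`gif + 56`), the checked load of `gif.Image.ColorMap`: NULL (`F.icm = none`), the `je` is taken. Heap and forest are the entry's. -/
theorem dgih3_seg_a_none (Lay : Layout) (hLay : Lay.hi = 0x1000000) (μ : Microarch) (hμ : UserX.MicroOK μ) (u₀ : State)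
    (hcode : HasCodeNat Lay u₀ Gif.L.DGifGetImageHeader.entry Gif.Code.code_DGifGetImageHeader.nat Gif.L.DGifGetImageHeader.size)
    (H : Heap) (rest : List Obj) (frames : List (Nat × FrameLayout)) (F : Forest) (R : Rd) (e : State) (ret : Word)
    (h_asan_store1_noabort : Asan.SmallCheck Lay μ ProgX.Base.WayInv (ProgX.Base.CodeOK u₀) [.rax, .rdx] 1 ProgX.Base.L.__asan_store1_noabort.entry)
    (h_asan_load8_noabort : Asan.SmallCheck Lay μ ProgX.Base.WayInv (ProgX.Base.CodeOK u₀) [.rax, .rcx, .rdx] 8 ProgX.Base.L.__asan_load8_noabort.entry)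
    (v : State) (hat : DGifGetImageHeader.Mid Gif.L.DGifGetImageHeader.at_108ef8 H rest frames F R H F u₀ e ret v)
    (hicm : F.icm = none) :
    ReachVia Lay μ ProgX.Base.WayInv v (dgih3_AtFlag H rest frames F R H F u₀ e ret) := by
  obtain ⟨hbody, c_r12⟩ := hat
  have he := hbody.entry
  v_entry he
  obtain ⟨henv, hrdi⟩ := hbody.pre
  have w_rip := hbody.rip
  have c_rsp : v.reg .rsp = e.reg .rsp - 136 := hbody.rsp
  have c_rbx : v.reg .rbx = e.reg .rdi := hbody.rbx
  have w_kept : RegsKept [.rsp] v v := RegsKept.refl _ _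
  have w_eq : Mem.EqOn ProgX.Base.L.textLo ProgX.Base.L.textHi u₀.mem v.mem := ProgX.Base.conv_code_eqOn hbody.code
  have hdf := (show abiInv _ from hbody.abi).1
  have hmx := (show abiInv _ from hbody.abi).2
  have hsse := ProgX.Base.sseOK_of_abiInv hbody.abi
  have k_r15 : v.mem.readLE (e.reg .rsp - 8) 8 = (e.reg .r15).toNat := hbody.slot_r15
  have k_r14 : v.mem.readLE (e.reg .rsp - 16) 8 = (e.reg .r14).toNat := hbody.slot_r14
  have k_r13 : v.mem.readLE (e.reg .rsp - 24) 8 = (e.reg .r13).toNat := hbody.slot_r13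
  have k_r12 : v.mem.readLE (e.reg .rsp - 32) 8 = (e.reg .r12).toNat := hbody.slot_r12
  have k_rbp : v.mem.readLE (e.reg .rsp - 40) 8 = (e.reg .rbp).toNat := hbody.slot_rbp
  have k_rbx : v.mem.readLE (e.reg .rsp - 48) 8 = (e.reg .rbx).toNat := hbody.slot_rbx
  have k_ra : UInt64.ofNat (v.mem.readLE (e.reg .rsp) 8) = ret := hbody.slot_ra
  have hsame : Mem.SameExcept
    [⟨(e.reg .rsp).toNat - 448, (e.reg .rsp).toNat⟩,
     shadowSpan ((e.reg .rsp).toNat - 120) ((e.reg .rsp).toNat - 56),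
     ⟨0x800000, 0x1000020⟩,
     ⟨R.cur, R.cur + 8⟩] e.mem v.mem := hbody.same
  have hcur := henv.ctx.cursor_range henv.heap.inv.shadow
  have hgin := hbody.ok.owns.inside hbody.inv.heap (o := (F.gif, 120)) List.mem_cons_self
  have hbase := henv.heap.base
  simp only at hgin
  rw [hbase] at hgin
  have hgin1 := hgin.1
  have hgin2 := hgin.2.2.2.2
  clear hgin
  have hgl : LiveIn (H.liveObjs ++ rest) (DGifGetImageHeader.framesIn frames e) F.gif 120 :=
    hbody.ok.gif_live.liveIn rest _ (Nat.le_refl _) (Nat.le_refl _)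
  -- the flag byte
  obtain ⟨fl, hfl⟩ : ∃ fl : Nat, v.mem.readLE (e.reg .rsp - 88) 1 = fl := ⟨_, rfl⟩
  -- the image colour map pointer is NULL
  have hshicm := hbody.ok.shape.icm
  rw [hicm] at hshicm
  have l_icm : v.mem.readLE (e.reg .rdi + 0x40) 8 = 0 := by
    rw [rd_eq_readLE v.mem _ (F.gif + 64) 8 (by u_omega)]
    simp only [gfield] at hshicm
    exact hshicm
  u_walk hcode [hμ.vendor] until [dgih3_at_108f47] span [ProgX.Base.L.textLo, ProgX.Base.L.textHi] side (v_side)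
  case check_108f16 =>
    -- dgif_lib.c:385 the store of `gif.Image.Interlace`: 1 byte inside gif
    have hun : ShadowUntouched v.mem s_108f16.mem := by v_untouched
    exact hgl.accSmall hbody.inv.shadow hun _ 1 (by decide) (by u_omega) (by u_omega)
  case check_108f23 =>
    -- dgif_lib.c:388 the load of `gif.Image.ColorMap`: 8 bytes inside gif
    have hun : ShadowUntouched v.mem s_108f23.mem := by v_untouched
    exact hgl.accSmall hbody.inv.shadow hun _ 8 (by decide) (by u_omega) (by u_omega)
  -- 0x108f47: the pointer is NULL, nothing to free
  obtain ⟨bv, hbv⟩ : ∃ bv : Nat, bv = (BitVec.setWidth 8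
      ((BitVec.zeroExtend 32 (BitVec.setWidth 8 (BitVec.zeroExtend 32 (BitVec.ofNat 8 fl)))).sshiftRight 6 &&& 1#32)).toNat :=
    ⟨_, rfl⟩
  rw [← hbv] at w_mem
  clear hbv
  obtain ⟨hinvA, hokA, hremA⟩ := store_stack hbody.inv hbody.ok ⟨hcur.1, hcur.2.1⟩ (e.reg .rsp - 144) 8 1085211
    (by u_omega) (by u_omega)
  obtain ⟨hinvB, hokB, hremB⟩ := store_gif hinvA hokA ⟨hcur.1, hcur.2.1⟩ hbase (e.reg .rdi + 56) 1 bv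
    (Or.inr (Or.inl (by u_omega)))
  obtain ⟨hinvC, hokC, hremC⟩ := store_stack hinvB hokB ⟨hcur.1, hcur.2.1⟩ (e.reg .rsp - 144) 8 1085224
    (by u_omega) (by u_omega)
  rw [← w_mem] at hinvC hokC hremC
  have hs : Mem.SameExcept [⟨(e.reg .rsp).toNat - 448, (e.reg .rsp).toNat - 136⟩, ⟨F.gif + 56, F.gif + 57⟩]
      v.mem s_108f2f.mem := by
    rw [w_mem]
    u_same
  have hbody1 : DGifGetImageHeader.Body dgih3_at_108f47 H rest frames F R H F u₀ e ret s_108f2f := by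
    refine dgih3_body_carry hbody w_rip w_rsp (w_kept.get .rbx rfl) (w_kept.get .rbp rfl) (ProgX.Base.conv_code_in w_eq) ?_ hs ?_
      hinvC hbody.region hbody.forest hokC ?_
    · refine ProgX.Base.abiInv_of ?_ ?_
      · rw [w_flags]
        simp only [X86.User.df_setStatus]
        exact w_df_108f23
      · rw [w_mxcsr]
        exact hmx
    · simp only [List.forall_mem_cons, List.not_mem_nil, false_imp_iff, implies_true, and_true]
      omega
    · rw [hremC, hremB, hremA]
      exact Nat.le_refl _
  refine ReachVia.done ?_
  exact {
    mid := ⟨hbody1, by rw [w_kept.get .r12 rfl]; exact c_r12⟩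
    icm := hicm
    r13 := by
      rw [w_r13, ProgX.toNat_ofBV32]
      have h1 := bv32_and7_succ (BitVec.zeroExtend 32 (BitVec.ofNat 8 fl))
      omega
  }

/-- **108EF8H … 108F47H, a previous map** (dgif_lib.c:384-391): as above, the pointer is `mp.obj`: `GifFreeMapObject` of it (both
objects freed: the heap `(H.release mp.colors).release mp.obj`; the shape through the callee's footprint by `Shape.through_free`), then
the checked store of NULL to `gif.Image.ColorMap` (`Shape.set_icm`, `Owns.free_icm`): the forest with `icm := none`. -/
theorem dgih3_seg_a_some (Lay : Layout) (hLay : Lay.hi = 0x1000000) (μ : Microarch) (hμ : UserX.MicroOK μ) (u₀ : State)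
    (hcode : HasCodeNat Lay u₀ Gif.L.DGifGetImageHeader.entry Gif.Code.code_DGifGetImageHeader.nat Gif.L.DGifGetImageHeader.size)
    (H : Heap) (rest : List Obj) (frames : List (Nat × FrameLayout)) (F : Forest) (R : Rd) (e : State) (ret : Word)
    (h_asan_store1_noabort : Asan.SmallCheck Lay μ ProgX.Base.WayInv (ProgX.Base.CodeOK u₀) [.rax, .rdx] 1 ProgX.Base.L.__asan_store1_noabort.entry)
    (h_asan_load8_noabort : Asan.SmallCheck Lay μ ProgX.Base.WayInv (ProgX.Base.CodeOK u₀) [.rax, .rcx, .rdx] 8 ProgX.Base.L.__asan_load8_noabort.entry)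
    (v : State) (hat : DGifGetImageHeader.Mid Gif.L.DGifGetImageHeader.at_108ef8 H rest frames F R H F u₀ e ret v)
    (mp : Map) (hicm : F.icm = some mp)
    (h_GifFreeMapObject : Calls Lay μ ProgX.Base.WayInv (ProgX.Base.conv u₀) Gif.L.GifFreeMapObject.entry
      (Gif.Spec.GifFreeMapObject.spec H rest (DGifGetImageHeader.framesIn frames e) mp.colors (3 * mp.count)))
    (h_asan_store8_noabort : Asan.SmallCheck Lay μ ProgX.Base.WayInv (ProgX.Base.CodeOK u₀) [.rax, .rcx, .rdx] 8 ProgX.Base.L.__asan_store8_noabort.entry) :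
    ReachVia Lay μ ProgX.Base.WayInv v (fun w => ∃ (Hc : Heap) (Fc : Forest), dgih3_AtFlag H rest frames F R Hc Fc u₀ e ret w) := by
  obtain ⟨hbody, c_r12⟩ := hat
  have he := hbody.entry
  v_entry he
  obtain ⟨henv, hrdi⟩ := hbody.pre
  have w_rip := hbody.rip
  have c_rsp : v.reg .rsp = e.reg .rsp - 136 := hbody.rsp
  have c_rbx : v.reg .rbx = e.reg .rdi := hbody.rbx
  have w_kept : RegsKept [.rsp] v v := RegsKept.refl _ _
  have w_eq : Mem.EqOn ProgX.Base.L.textLo ProgX.Base.L.textHi u₀.mem v.mem := ProgX.Base.conv_code_eqOn hbody.code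
  have hdf := (show abiInv _ from hbody.abi).1
  have hmx := (show abiInv _ from hbody.abi).2
  have hsse := ProgX.Base.sseOK_of_abiInv hbody.abi
  have k_r15 : v.mem.readLE (e.reg .rsp - 8) 8 = (e.reg .r15).toNat := hbody.slot_r15
  have k_r14 : v.mem.readLE (e.reg .rsp - 16) 8 = (e.reg .r14).toNat := hbody.slot_r14
  have k_r13 : v.mem.readLE (e.reg .rsp - 24) 8 = (e.reg .r13).toNat := hbody.slot_r13
  have k_r12 : v.mem.readLE (e.reg .rsp - 32) 8 = (e.reg .r12).toNat := hbody.slot_r12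
  have k_rbp : v.mem.readLE (e.reg .rsp - 40) 8 = (e.reg .rbp).toNat := hbody.slot_rbp
  have k_rbx : v.mem.readLE (e.reg .rsp - 48) 8 = (e.reg .rbx).toNat := hbody.slot_rbx
  have k_ra : UInt64.ofNat (v.mem.readLE (e.reg .rsp) 8) = ret := hbody.slot_ra
  have hsame : Mem.SameExcept
    [⟨(e.reg .rsp).toNat - 448, (e.reg .rsp).toNat⟩,
     shadowSpan ((e.reg .rsp).toNat - 120) ((e.reg .rsp).toNat - 56),
     ⟨0x800000, 0x1000020⟩,
     ⟨R.cur, R.cur + 8⟩] e.mem v.mem := hbody.same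
  have hcur := henv.ctx.cursor_range henv.heap.inv.shadow
  have hgin := hbody.ok.owns.inside hbody.inv.heap (o := (F.gif, 120)) List.mem_cons_self
  have hbase := henv.heap.base
  simp only at hgin
  rw [hbase] at hgin
  have hgin1 := hgin.1
  have hgin2 := hgin.2.2.2.2
  clear hgin
  have hgl : LiveIn (H.liveObjs ++ rest) (DGifGetImageHeader.framesIn frames e) F.gif 120 :=
    hbody.ok.gif_live.liveIn rest _ (Nat.le_refl _) (Nat.le_refl _)
  -- the flag byte
  obtain ⟨fl, hfl⟩ : ∃ fl : Nat, v.mem.readLE (e.reg .rsp - 88) 1 = fl := ⟨_, rfl⟩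
  -- the image colour map pointer is the map's object
  obtain ⟨hl1, hl2, hne12, hcol⟩ := hbody.ok.icm_live hicm
  have hshicm := hbody.ok.shape.icm
  rw [hicm] at hshicm
  have hoin := hbody.ok.owns.inside hbody.inv.heap (o := (mp.obj, 24)) (Forest.mem_owned_icm (by rw [hicm]; exact List.mem_cons_self))
  simp only at hoin
  rw [hbase] at hoin
  have hoin1 := hoin.1
  have hoin2 := hoin.2.2.2.2
  clear hoin
  have l_icm : v.mem.readLE (e.reg .rdi + 0x40) 8 = mp.obj := by
    rw [rd_eq_readLE v.mem _ (F.gif + 64) 8 (by u_omega)]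
    have h1 := hshicm.1
    simp only [gfield] at h1
    exact h1
  -- the two stores in front of the call, BEFORE the walk: the check call's return address, the byte `Interlace`
  obtain ⟨bv, hbv⟩ : ∃ bv : Nat, bv = (BitVec.setWidth 8
      ((BitVec.zeroExtend 32 (BitVec.setWidth 8 (BitVec.zeroExtend 32 (BitVec.ofNat 8 fl)))).sshiftRight 6 &&& 1#32)).toNat :=
    ⟨_, rfl⟩
  obtain ⟨hinvA, hokA, hremA⟩ := store_stack hbody.inv hbody.ok ⟨hcur.1, hcur.2.1⟩ (e.reg .rsp - 144) 8 1085211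
    (by u_omega) (by u_omega)
  obtain ⟨hinvB, hokB, hremB⟩ := store_gif hinvA hokA ⟨hcur.1, hcur.2.1⟩ hbase (e.reg .rdi + 56) 1 bv
    (Or.inr (Or.inl (by u_omega)))
  obtain ⟨MB, hMB⟩ : ∃ MB : Mem, MB = (v.mem.writeLE (e.reg .rsp - 144) 8 1085211).writeLE (e.reg .rdi + 56) 1 bv := ⟨_, rfl⟩
  rw [← hMB] at hinvB hokB hremB
  clear hinvA hokA
  u_walk hcode [hμ.vendor] until [Gif.L.DGifGetImageHeader.ret11] span [ProgX.Base.L.textLo, ProgX.Base.L.textHi] side (v_side)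
  case check_108f16 =>
    -- dgif_lib.c:385 the store of `gif.Image.Interlace`: 1 byte inside gif
    have hun : ShadowUntouched v.mem s_108f16.mem := by v_untouched
    exact hgl.accSmall hbody.inv.shadow hun _ 1 (by decide) (by u_omega) (by u_omega)
  case check_108f23 =>
    -- dgif_lib.c:388 the load of `gif.Image.ColorMap`: 8 bytes inside gif
    have hun : ShadowUntouched v.mem s_108f23.mem := by v_untouched
    exact hgl.accSmall hbody.inv.shadow hun _ 8 (by decide) (by u_omega) (by u_omega)
  case call_inv =>
    v_inv
  case pre_108f31 =>
    rw [← hbv] at w_mem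
    rw [← hMB] at w_mem
    have hs : Mem.SameExcept [⟨(e.reg .rsp).toNat - 448, (e.reg .rsp).toNat - 136⟩] MB s_108f31.mem := by
      rw [w_mem]
      u_same
    have henv' : Env H rest (DGifGetImageHeader.framesIn frames e) F R s_108f31 := by
      refine henv.at_call hinvB hokB hs (by omega) (by omega) ?_ ?_ ?_
      · rw [w_rsp]
        u_omega
      · rw [w_rsp]
        u_omega
      · rw [w_rsp]
        u_omega
    obtain ⟨j1, j2, j3, j4⟩ := henv'.ok.icm_live hicm
    refine ⟨henv'.heap, Or.inr ?_⟩
    have erdi : (s_108f31.reg .rdi).toNat = mp.obj := by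
      rw [w_rdi]
      u_omega
    rw [erdi]
    exact ⟨j1, j2, j3, j4⟩
  -- 0x108f36 (ret11): GifFreeMapObject has returned
  have erdi : (s_108f31.reg .rdi).toNat = mp.obj := by
    rw [w_rdi_108f31]
    u_omega
  have e_top : (s_108f31.reg .rsp).toNat + 8 = (e.reg .rsp).toNat - 136 := by
    rw [w_rsp_108f31]
    u_omega
  obtain ⟨_, hpost⟩ := w_post
  have hinv2 := hpost (by rw [erdi]; omega)
  rw [erdi, e_top] at hinv2
  clear hpost
  have hfoot := w_same
  simp only [X86.User.Spec.footprint, vspec, w_rsp_108f31, erdi] at hfoot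
  -- the environment at GifFreeMapObject's entry, once more (the heap's invariant and the shape of THAT memory)
  have henv1 : Env H rest (DGifGetImageHeader.framesIn frames e) F R s_108f31 := by
    have w_mem := w_mem_108f31
    rw [← hbv] at w_mem
    rw [← hMB] at w_mem
    have hs : Mem.SameExcept [⟨(e.reg .rsp).toNat - 448, (e.reg .rsp).toNat - 136⟩] MB s_108f31.mem := by
      rw [w_mem]
      u_same
    refine henv.at_call hinvB hokB hs (by omega) (by omega) ?_ ?_ ?_
    · rw [w_rsp_108f31]
      u_omega
    · rw [w_rsp_108f31]
      u_omega
    · rw [w_rsp_108f31]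
      u_omega
  have hok1 := henv1.heap.inv.heap
  -- where the colour array is
  have hcin := hbody.ok.owns.inside hbody.inv.heap (o := (mp.colors, 3 * mp.count))
    (Forest.mem_owned_icm (by rw [hicm]; exact List.mem_cons_of_mem _ List.mem_cons_self))
  simp only at hcin
  rw [hbase] at hcin
  have hcin1 := hcin.1
  have hcin2 := hcin.2.2.2.2
  clear hcin
  -- THE SHAPE THROUGH THE TWO FREES: every window of the callee's footprint is loose (its stack, two header words, two shadow spans)
  obtain ⟨cc, hlc⟩ := hl2
  obtain ⟨co, hlo⟩ := hl1
  have e144 : (e.reg .rsp - 144).toNat = (e.reg .rsp).toNat - 144 := by u_omega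
  rw [e144] at hfoot
  have hloose : ∀ w, w ∈ [(⟨(e.reg .rsp).toNat - 144 - 48, (e.reg .rsp).toNat - 144⟩ : Span),
      ⟨mp.colors - 24, mp.colors - 16⟩, shadowSpan mp.colors (mp.colors + 3 * mp.count),
      ⟨mp.obj - 24, mp.obj - 16⟩, shadowSpan mp.obj (mp.obj + 24)] → Loose H F R w := by
    simp only [List.forall_mem_cons, List.not_mem_nil, false_imp_iff, implies_true, and_true]
    refine ⟨?_, ?_, ?_, ?_, ?_⟩
    · apply Loose.stack hok1
      · simp only
        omega
      · simp only
        omega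
      · simp only
        omega
    · exact Loose.header hok1 ⟨hcur.1, hcur.2.1⟩ hlc (by simp only; omega) (by simp only; omega)
    · apply Loose.shadow hok1 hcur.2.1
      simp only [shadowSpan]
      omega
    · exact Loose.header hok1 ⟨hcur.1, hcur.2.1⟩ hlo (by simp only; omega) (by simp only; omega)
    · apply Loose.shadow hok1 hcur.2.1
      simp only [shadowSpan]
      omega
  obtain ⟨hshape2, hplaced1⟩ := Shape.through_free henv1.ok.shape (henv1.ok.owns.placed hok1) hok1 ⟨hcur.1, hcur.2.1⟩ hfoot
    hloose mp.colors
  have hplaced2 := hplaced1.release mp.obj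
  have howns2 := hbody.ok.owns.free_icm hicm
  have hlg2 : ((H.release mp.colors).release mp.obj).Live F.gif 120 := howns2.live (F.gif, 120) List.mem_cons_self
  have hgl2 : LiveIn (((H.release mp.colors).release mp.obj).liveObjs ++ rest) (DGifGetImageHeader.framesIn frames e) F.gif 120 :=
    hlg2.liveIn rest _ (Nat.le_refl _) (Nat.le_refl _)
  -- the footprint since `v`
  v_after_call w_rsp_108f31 w_mem_108f31
  have hsame1 : Mem.SameExcept [⟨(e.reg .rsp).toNat - 448, (e.reg .rsp).toNat - 136⟩, ⟨0x800000, 0x1000020⟩]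
      v.mem s_108f31r.mem := by
    simp only [shadowSpan] at w_same ⊢
    u_same
  clear hfoot hloose
  -- 0x108f36 … 0x108f47: the checked store of NULL to `gif.Image.ColorMap` (dgif_lib.c:390)
  u_walk hcode [hμ.vendor] until [dgih3_at_108f47] span [ProgX.Base.L.textLo, ProgX.Base.L.textHi] side (v_side)
  case check_108f3a =>
    -- 8 bytes inside gif, which is live in the heap after the two frees
    have hun : ShadowUntouched s_108f31r.mem s_108f3a.mem := by v_untouched
    exact hgl2.accSmall hinv2.shadow hun _ 8 (by decide) (by u_omega) (by u_omega)
  -- 0x108f47: the exit assertion for the heap after the frees and the forest without `icm`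
  have hs2 : Mem.SameExcept [⟨(e.reg .rsp).toNat - 448, (e.reg .rsp).toNat - 136⟩, ⟨F.gif + 64, F.gif + 72⟩]
      s_108f31r.mem s_108f3f.mem := by
    rw [w_mem]
    u_same
  have hs : Mem.SameExcept [⟨(e.reg .rsp).toNat - 448, (e.reg .rsp).toNat - 136⟩, ⟨0x800000, 0x1000020⟩]
      v.mem s_108f3f.mem := by
    apply hsame1.step_same hs2
    simp only [List.forall_mem_cons, List.not_mem_nil, false_imp_iff, implies_true, and_true]
    refine ⟨?_, ?_⟩
    · intro a h1 h2
      exact ⟨_, List.mem_cons_self, h1, h2⟩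
    · intro a h1 h2
      refine ⟨_, List.mem_cons_of_mem _ List.mem_cons_self, ?_, ?_⟩
      · simp only
        omega
      · simp only
        omega
  have hbase2 : ((H.release mp.colors).release mp.obj).base = 0x800000 := by
    rw [Heap.release_base, Heap.release_base]
    exact hbase
  have hinvC := hinv2.writeLE_out (e.reg .rsp - 144) 8 1085247 (by u_omega) (Or.inl (by rw [hbase2]; u_omega))
    (Or.inl (by u_omega))
  have hinvD := hinvC.writeLE_live hlg2 (e.reg .rdi + 64) 8 0 (by u_omega) (by u_omega)
  rw [← w_mem] at hinvD
  have hshape3 : Shape { F with icm := none } R s_108f3f.mem := by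
    apply Shape.set_icm hshape2 hplaced2 hinv2.heap ⟨hcur.1, hcur.2.1⟩ hs2
    · simp only [List.forall_mem_cons, List.not_mem_nil, false_imp_iff, implies_true, and_true]
      refine ⟨Or.inl ?_, Or.inr ⟨Nat.le_refl _, Nat.le_refl _⟩⟩
      apply Loose.stack hinv2.heap
      · simp only
        omega
      · simp only
        omega
      · simp only
        omega
    · show GifFileType.Image.ColorMap s_108f3f.mem F.gif = 0
      simp only [gfield]
      rw [w_mem, rd_writeLE_same _ (e.reg .rdi + 64) 8 0 _ (by u_omega) (by decide)]
  have hrem3 : rem R s_108f3f.mem = rem R v.mem := by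
    apply rem_sameExcept hs (by omega)
    simp only [List.forall_mem_cons, List.not_mem_nil, false_imp_iff, implies_true, and_true]
    omega
  have hbody1 : DGifGetImageHeader.Body dgih3_at_108f47 H rest frames F R ((H.release mp.colors).release mp.obj)
      { F with icm := none } u₀ e ret s_108f3f := by
    refine dgih3_body_carry hbody w_rip w_rsp (w_kept.get .rbx rfl) (w_kept.get .rbp rfl) (ProgX.Base.conv_code_in w_eq) ?_ hs ?_
      hinvD ?_ ⟨rfl, rfl, rfl, rfl, rfl⟩ ⟨howns2, hshape3⟩ ?_
    · refine ProgX.Base.abiInv_of ?_ ?_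
      · rw [w_flags]
        exact w_df_108f3a
      · rw [w_mxcsr]
        exact w_mx
    · simp only [List.forall_mem_cons, List.not_mem_nil, false_imp_iff, implies_true, and_true]
      omega
    · exact ⟨by rw [Heap.release_base, Heap.release_base], by rw [Heap.release_limit, Heap.release_limit]⟩
    · rw [hrem3]
      exact Nat.le_refl _
  refine ReachVia.done ⟨(H.release mp.colors).release mp.obj, { F with icm := none }, ?_⟩
  exact {
    mid := ⟨hbody1, by rw [w_kept.get .r12 rfl]; exact c_r12⟩
    icm := rfl
    r13 := by
      rw [w_r13, ProgX.toNat_ofBV32]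
      have h1 := bv32_and7_succ (BitVec.zeroExtend 32 (BitVec.ofNat 8 fl))
      omega
  }

/-- **At 108FDFH (ret21), `GifMakeMapObject(1 << BitsPerPixel, NULL)` has returned**: `Mid` for the grown heap `Hc` and the forest
`Fc`, which still has NO image colour map (the new objects are live in `Hc` but not owned yet); `rax` is NULL, or the new
`ColorMapObject`: its two objects can be owned together with the forest's (`Owns.adopt_icm`, stated for the forest with the new map),
its fields `ColorCount`, `Colors` hold `count`, `colors`. -/
structure dgih3_AtRet21 (H : Heap) (rest : List Obj) (frames : List (Nat × FrameLayout)) (F : Forest) (R : Rd)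
    (Hc : Heap) (Fc : Forest) (u₀ e : State) (ret : Word) (v : State) : Prop where
  mid : DGifGetImageHeader.Mid Gif.L.DGifGetImageHeader.ret21 H rest frames F R Hc Fc u₀ e ret v
  /-- no image colour map yet -/
  icm : Fc.icm = none
  /-- NULL, or the new map -/
  res : (v.reg .rax).toNat = 0 ∨
    ∃ colors count : Nat,
      Owns Hc ({ Fc with icm := some ⟨(v.reg .rax).toNat, colors, count⟩ } : Forest).owned ∧
      ColorMapObject.ColorCount v.mem (v.reg .rax).toNat = count ∧
      ColorMapObject.Colors v.mem (v.reg .rax).toNat = colors ∧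
      1 ≤ count ∧ count ≤ 256

/-- **108F47H … 108F4EH | 108FDFH** (dgif_lib.c:393-397): the flag `Buf[0] & 0x80`. Clear: to 108F4EH, nothing changed. Set:
`GifMakeMapObject(1 << r13d, NULL)` with `r13d = BitsPerPixel ≤ 8`: at most 256 colours. -/
theorem dgih3_seg_b (Lay : Layout) (hLay : Lay.hi = 0x1000000) (μ : Microarch) (hμ : UserX.MicroOK μ) (u₀ : State)
    (hcode : HasCodeNat Lay u₀ Gif.L.DGifGetImageHeader.entry Gif.Code.code_DGifGetImageHeader.nat Gif.L.DGifGetImageHeader.size)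
    (H : Heap) (rest : List Obj) (frames : List (Nat × FrameLayout)) (F : Forest) (R : Rd) (e : State) (ret : Word)
    (Hc : Heap) (Fc : Forest)
    (h_GifMakeMapObject : ∀ (count : Nat), Calls Lay μ ProgX.Base.WayInv (ProgX.Base.conv u₀) Gif.L.GifMakeMapObject.entry
      (Gif.Spec.GifMakeMapObject.spec Hc rest (DGifGetImageHeader.framesIn frames e) count))
    (v : State) (hat : dgih3_AtFlag H rest frames F R Hc Fc u₀ e ret v) :
    ReachVia Lay μ ProgX.Base.WayInv v (fun w =>
      DGifGetImageHeader.Mid Gif.L.DGifGetImageHeader.at_108f4e H rest frames F R Hc Fc u₀ e ret w ∨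
      ∃ (H' : Heap), dgih3_AtRet21 H rest frames F R H' Fc u₀ e ret w) := by
  obtain ⟨⟨hbody, c_r12⟩, hicm, hr13⟩ := hat
  have he := hbody.entry
  v_entry he
  obtain ⟨henv, hrdi⟩ := hbody.pre
  have hmk := h_GifMakeMapObject (2 ^ (v.reg .r13).toNat)
  clear h_GifMakeMapObject
  have w_rip := hbody.rip
  have c_rsp : v.reg .rsp = e.reg .rsp - 136 := hbody.rsp
  have c_rbx : v.reg .rbx = e.reg .rdi := hbody.rbx
  obtain ⟨z, c_r13⟩ : ∃ z, v.reg .r13 = z := ⟨_, rfl⟩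
  rw [c_r13] at hr13 hmk
  have w_kept : RegsKept [.rsp] v v := RegsKept.refl _ _
  have w_eq : Mem.EqOn ProgX.Base.L.textLo ProgX.Base.L.textHi u₀.mem v.mem := ProgX.Base.conv_code_eqOn hbody.code
  have hdf := (show abiInv _ from hbody.abi).1
  have hmx := (show abiInv _ from hbody.abi).2
  have hsse := ProgX.Base.sseOK_of_abiInv hbody.abi
  have hcur := henv.ctx.cursor_range henv.heap.inv.shadow
  have hgin := hbody.ok.owns.inside hbody.inv.heap (o := (F.gif, 120)) (by rw [← hbody.forest.1]; exact List.mem_cons_self)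
  have hbase : Hc.base = 0x800000 := by
    rw [hbody.region.1]
    exact henv.heap.base
  have hlimit : Hc.limit = 0xC00000 := by
    rw [hbody.region.2]
    exact henv.heap.limit
  simp only at hgin
  rw [hbase] at hgin
  have hgin1 := hgin.1
  have hgin2 := hgin.2.2.2.2
  clear hgin
  -- the flag byte
  obtain ⟨fl, hfl⟩ : ∃ fl : Nat, v.mem.readLE (e.reg .rsp - 88) 1 = fl := ⟨_, rfl⟩
  u_walk hcode [hμ.vendor] until [Gif.L.DGifGetImageHeader.at_108f4e, Gif.L.DGifGetImageHeader.ret21] span [ProgX.Base.L.textLo, ProgX.Base.L.textHi] side (v_side)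
  case call_inv =>
    v_inv
  case pre_108fda =>
    -- GIFMAKEMAPOBJECT'S PRECONDITION: the heap's invariant for the present heap below the pushed return address, the count
    have hinvA := hbody.inv.writeLE_out (e.reg .rsp - 144) 8 1085407 (by u_omega) (Or.inl (by rw [hbase]; u_omega))
      (Or.inl (by u_omega))
    rw [← w_mem] at hinvA
    have hinvL : HeapInv Hc rest (DGifGetImageHeader.framesIn frames e) ((s_108fda.reg .rsp).toNat + 8) s_108fda.mem := by
      refine hinvA.lower ?_ ?_ ?_
      · rw [w_rsp]
        u_omega
      · rw [w_rsp]
        u_omega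
      · rw [w_rsp]
        u_omega
    have hpre : HeapPre Hc rest (DGifGetImageHeader.framesIn frames e) s_108fda :=
      ⟨hinvL, hbase, hlimit, henv.heap.text, henv.heap.offText⟩
    refine ⟨hpre, ?_, two_pow_le_256 _ hr13.2, Or.inl ?_⟩
    · rw [w_rdi, ProgX.toNat_ofBV32, ProgX.byte_of_part32]
      have e1 : z.toNat % 256 % 32 = z.toNat := by omega
      rw [e1, bv32_one_shl_toNat _ (by omega)]
      have h256 := two_pow_le_256 _ hr13.2
      exact Nat.mod_eq_of_lt (Nat.lt_of_le_of_lt h256 (by decide))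
    · rw [w_rsi]
      decide
  · -- 0x108fdf (ret21): GIFMAKEMAPOBJECT HAS RETURNED
    obtain ⟨H', hgrew, hinv', hres⟩ : MakeMapPost Hc rest (DGifGetImageHeader.framesIn frames e) (2 ^ z.toNat) s_108fda s_108fdar :=
      w_post
    have e_top : (s_108fda.reg .rsp).toNat + 8 = (e.reg .rsp).toNat - 136 := by
      rw [w_rsp_108fda]
      u_omega
    rw [e_top] at hinv'
    -- the invariants at the callee's entry: one stack store since `v`
    obtain ⟨hinvA, hokA, hremA⟩ := store_stack hbody.inv hbody.ok ⟨hcur.1, hcur.2.1⟩ (e.reg .rsp - 144) 8 1085407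
      (by u_omega) (by u_omega)
    rw [← w_mem_108fda] at hinvA hokA hremA
    have hnext : 0x800040 ≤ Hc.next ∧ Hc.next ≤ 0xC00020 := by
      have hroom := hbody.inv.heap.room
      rw [hbase, hlimit] at hroom
      rw [Heap.next_def, hbase]
      omega
    have hfoot := w_same
    simp only [X86.User.Spec.footprint, vspec, w_rsp_108fda] at hfoot
    have e144 : (e.reg .rsp - 144).toNat = (e.reg .rsp).toNat - 144 := by u_omega
    rw [e144] at hfoot
    -- THE STATE INVARIANT THROUGH THE CALLEE'S FOOTPRINT: its stack, the control cell, everything above the old bump pointer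
    have hloose : ∀ w, w ∈ [(⟨(e.reg .rsp).toNat - 144 - 160, (e.reg .rsp).toNat - 144⟩ : Span),
        ⟨8388608, 8388616⟩, ⟨Hc.next - 32, 12582912⟩, shadowSpan (Hc.next - 32) 12582912] → Loose Hc Fc R w := by
      simp only [List.forall_mem_cons, List.not_mem_nil, false_imp_iff, implies_true, and_true]
      refine ⟨?_, ?_, ?_, ?_⟩
      · apply Loose.stack hinvA.heap
        · simp only
          omega
        · simp only
          omega
        · simp only
          omega
      · apply Loose.cell hinvA.heap ⟨hcur.1, hcur.2.1⟩
        · simp only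
          omega
        · simp only
          omega
      · apply Loose.above hinvA.heap ⟨hcur.1, hcur.2.1⟩
        · simp only
          rw [Heap.next_def]
          omega
        · simp only
          omega
      · apply Loose.shadow hinvA.heap hcur.2.1
        simp only [shadowSpan]
        omega
    have hokS : GifOK Hc Fc R s_108fdar.mem := hokA.sameExcept hinvA.heap ⟨hcur.1, hcur.2.1⟩ hfoot hloose
    have hok' : GifOK H' Fc R s_108fdar.mem := hokS.reheap (hbody.ok.owns.grew hgrew)
    -- the footprint since `v`
    v_after_call w_rsp_108fda w_mem_108fda
    have hs : Mem.SameExcept [⟨(e.reg .rsp).toNat - 448, (e.reg .rsp).toNat - 136⟩, ⟨0x800000, 0x1000020⟩]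
        v.mem s_108fdar.mem := by
      simp only [shadowSpan] at w_same ⊢
      u_same
    have hrem1 : rem R s_108fdar.mem = rem R v.mem := by
      apply rem_sameExcept hs (by omega)
      simp only [List.forall_mem_cons, List.not_mem_nil, false_imp_iff, implies_true, and_true]
      omega
    have hbody1 : DGifGetImageHeader.Body Gif.L.DGifGetImageHeader.ret21 H rest frames F R H' Fc u₀ e ret s_108fdar := by
      refine dgih3_body_carry hbody w_rip w_rsp (w_kept.get .rbx rfl) (w_kept.get .rbp rfl) w_code w_inv hs ?_
        hinv' (hbody.region.trans hgrew.region) hbody.forest hok' ?_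
      · simp only [List.forall_mem_cons, List.not_mem_nil, false_imp_iff, implies_true, and_true]
        omega
      · rw [hrem1]
        exact Nat.le_refl _
    refine ReachVia.done (Or.inr ⟨H', ?_⟩)
    refine ⟨⟨hbody1, ?_⟩, hicm, ?_⟩
    · rw [w_kept.get .r12 rfl]
      exact c_r12
    · rcases hres with h0 | ⟨colors, l1, l2, n1, n2, hne, hcc, hcol, c2, c256⟩
      · exact Or.inl h0
      · refine Or.inr ⟨colors, 2 ^ z.toNat, ?_, hcc, hcol, by omega, c256⟩
        exact hbody.ok.owns.adopt_icm hbody.inv.heap hgrew l1 l2 n1 n2 hne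
  · -- 0x108f4e: the flag is clear, no local colour map
    have hs : Mem.SameExcept [] v.mem s_108f4c.mem := by
      rw [w_mem]
      exact Mem.SameExcept.refl _ _
    have hbody1 : DGifGetImageHeader.Body Gif.L.DGifGetImageHeader.at_108f4e H rest frames F R Hc Fc u₀ e ret s_108f4c := by
      refine dgih3_body_carry hbody w_rip w_rsp (w_kept.get .rbx rfl) (w_kept.get .rbp rfl) (ProgX.Base.conv_code_in w_eq) ?_ hs ?_
        ?_ hbody.region hbody.forest ?_ ?_
      · refine ProgX.Base.abiInv_of ?_ ?_
        · rw [w_flags]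
          simp only [X86.User.df_setStatus]
          exact hdf
        · rw [w_mxcsr]
          exact hmx
      · intro w hw
        exact absurd hw List.not_mem_nil
      · rw [w_mem]
        exact hbody.inv
      · rw [w_mem]
        exact hbody.ok
      · rw [w_mem]
        exact Nat.le_refl _
    refine ReachVia.done (Or.inl ⟨hbody1, ?_⟩)
    rw [w_kept.get .r12 rfl]
    exact c_r12

/-- **108FDFH (ret21) … 108FFEH | 108E78H** (dgif_lib.c:396-404): `r13 = ` the result, the checked store of it to
`gif.Image.ColorMap`. NULL (l.398-400): the checked store of `gif.Error = D_GIF_ERR_NOT_ENOUGH_MEM`, `r13d = 0`, to the epilogue with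
the forest as it was (`icm = none`). Otherwise THE MAP IS ADOPTED (`Shape.set_icm` with `MapAt.intro`; the ownership was prepared at
ret21), `r14d = 0`: the loop head with the measure `count`. -/
theorem dgih3_seg_c (Lay : Layout) (hLay : Lay.hi = 0x1000000) (μ : Microarch) (hμ : UserX.MicroOK μ) (u₀ : State)
    (hcode : HasCodeNat Lay u₀ Gif.L.DGifGetImageHeader.entry Gif.Code.code_DGifGetImageHeader.nat Gif.L.DGifGetImageHeader.size)
    (H : Heap) (rest : List Obj) (frames : List (Nat × FrameLayout)) (F : Forest) (R : Rd) (e : State) (ret : Word)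
    (Hc : Heap) (Fc : Forest)
    (h_asan_store8_noabort : Asan.SmallCheck Lay μ ProgX.Base.WayInv (ProgX.Base.CodeOK u₀) [.rax, .rcx, .rdx] 8 ProgX.Base.L.__asan_store8_noabort.entry)
    (h_asan_store4_noabort : Asan.SmallCheck Lay μ ProgX.Base.WayInv (ProgX.Base.CodeOK u₀) [.rax, .rcx, .rdx] 4 ProgX.Base.L.__asan_store4_noabort.entry)
    (v : State) (hat : dgih3_AtRet21 H rest frames F R Hc Fc u₀ e ret v) :
    ReachVia Lay μ ProgX.Base.WayInv v (fun w =>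
      (∃ (F' : Forest) (m : Nat), DGifGetImageHeader.Head m H rest frames F R Hc F' u₀ e ret w) ∨
      DGifGetImageHeader.Done H rest frames F R Hc Fc u₀ e ret w) := by
  obtain ⟨⟨hbody, c_r12⟩, hicm, hres⟩ := hat
  have he := hbody.entry
  v_entry he
  obtain ⟨henv, hrdi⟩ := hbody.pre
  have w_rip := hbody.rip
  have c_rsp : v.reg .rsp = e.reg .rsp - 136 := hbody.rsp
  have c_rbx : v.reg .rbx = e.reg .rdi := hbody.rbx
  obtain ⟨a, c_rax⟩ : ∃ a, v.reg .rax = a := ⟨_, rfl⟩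
  rw [c_rax] at hres
  have w_kept : RegsKept [.rsp] v v := RegsKept.refl _ _
  have w_eq : Mem.EqOn ProgX.Base.L.textLo ProgX.Base.L.textHi u₀.mem v.mem := ProgX.Base.conv_code_eqOn hbody.code
  have hdf := (show abiInv _ from hbody.abi).1
  have hmx := (show abiInv _ from hbody.abi).2
  have hsse := ProgX.Base.sseOK_of_abiInv hbody.abi
  have hcur := henv.ctx.cursor_range henv.heap.inv.shadow
  have hgF : Fc.gif = F.gif := hbody.forest.1
  have hgmem : (F.gif, 120) ∈ Fc.owned := by
    rw [← hgF]
    exact List.mem_cons_self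
  have hgin := hbody.ok.owns.inside hbody.inv.heap (o := (F.gif, 120)) hgmem
  have hbase : Hc.base = 0x800000 := by
    rw [hbody.region.1]
    exact henv.heap.base
  simp only at hgin
  rw [hbase] at hgin
  have hgin1 := hgin.1
  have hgin2 := hgin.2.2.2.2
  clear hgin
  have hlg : Hc.Live F.gif 120 := hbody.ok.owns.live (F.gif, 120) hgmem
  have hgl : LiveIn (Hc.liveObjs ++ rest) (DGifGetImageHeader.framesIn frames e) F.gif 120 :=
    hlg.liveIn rest _ (Nat.le_refl _) (Nat.le_refl _)
  u_walk hcode [hμ.vendor] until [Gif.L.DGifGetImageHeader.at_108ffe, Gif.L.DGifGetImageHeader.at_108e78] span [ProgX.Base.L.textLo, ProgX.Base.L.textHi] side (v_side)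
  case check_108fe6 =>
    -- dgif_lib.c:396 the store of `gif.Image.ColorMap`: 8 bytes inside gif
    have hun : ShadowUntouched v.mem s_108fe6.mem := by v_untouched
    exact hgl.accSmall hbody.inv.shadow hun _ 8 (by decide) (by u_omega) (by u_omega)
  case check_1090d2 =>
    -- dgif_lib.c:399 the store of `gif.Error`: 4 bytes inside gif
    have hun : ShadowUntouched v.mem s_1090d2.mem := by v_untouched
    exact hgl.accSmall hbody.inv.shadow hun _ 4 (by decide) (by u_omega) (by u_omega)
  · -- 0x108e78 FROM 0x1090de: the allocation failed, NULL and the error code stored, `r13d = 0`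
    have ha0 : a.toNat = 0 := hbr_108ff2
    rw [ha0] at w_mem
    have hs : Mem.SameExcept [⟨(e.reg .rsp).toNat - 448, (e.reg .rsp).toNat - 136⟩, ⟨F.gif + 64, F.gif + 72⟩,
        ⟨F.gif + 96, F.gif + 100⟩] v.mem s_1090de.mem := by
      rw [w_mem]
      u_same
    -- the heap's invariant: two return addresses (stack), two stores into gif
    have hinv1 := hbody.inv.writeLE_out (e.reg .rsp - 144) 8 1085419 (by u_omega) (Or.inl (by rw [hbase]; u_omega))
      (Or.inl (by u_omega))
    have hinv2 := hinv1.writeLE_live hlg (e.reg .rdi + 64) 8 0 (by u_omega) (by u_omega)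
    have hinv3 := hinv2.writeLE_out (e.reg .rsp - 144) 8 1085655 (by u_omega) (Or.inl (by rw [hbase]; u_omega))
      (Or.inl (by u_omega))
    have hinv4 := hinv3.writeLE_live hlg (e.reg .rdi + 96) 4 109 (by u_omega) (by u_omega)
    rw [← w_mem] at hinv4
    -- the shape: `gif.Image.ColorMap` is NULL again, `icm` stays `none`
    have hshape : Shape { Fc with icm := none } R s_1090de.mem := by
      apply Shape.set_icm hbody.ok.shape (hbody.ok.owns.placed hbody.inv.heap) hbody.inv.heap ⟨hcur.1, hcur.2.1⟩ hs
      · simp only [List.forall_mem_cons, List.not_mem_nil, false_imp_iff, implies_true, and_true]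
        refine ⟨Or.inl ?_, Or.inr ?_, Or.inl ?_⟩
        · apply Loose.stack hbody.inv.heap
          · simp only
            omega
          · simp only
            omega
          · simp only
            omega
        · omega
        · apply Loose.gifScalar
          right
          right
          simp only
          omega
      · show GifFileType.Image.ColorMap s_1090de.mem Fc.gif = 0
        simp only [gfield]
        rw [hgF, w_mem]
        rw [rd_writeLE_disjoint _ _ _ _ _ _ (by u_omega) (by omega) (by u_omega)]
        rw [rd_writeLE_disjoint _ _ _ _ _ _ (by u_omega) (by omega) (by u_omega)]
        rw [rd_writeLE_same _ (e.reg .rdi + 64) 8 0 _ (by u_omega) (by decide)]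
    rw [Forest.set_icm_eq hicm] at hshape
    have hrem : rem R s_1090de.mem = rem R v.mem := by
      apply rem_sameExcept hs (by omega)
      simp only [List.forall_mem_cons, List.not_mem_nil, false_imp_iff, implies_true, and_true]
      omega
    have hbody1 : DGifGetImageHeader.Body Gif.L.DGifGetImageHeader.at_108e78 H rest frames F R Hc Fc u₀ e ret s_1090de := by
      refine dgih3_body_carry hbody w_rip w_rsp (w_kept.get .rbx rfl) (w_kept.get .rbp rfl) (ProgX.Base.conv_code_in w_eq) ?_ hs ?_
        hinv4 hbody.region hbody.forest ⟨hbody.ok.owns, hshape⟩ ?_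
      · refine ProgX.Base.abiInv_of ?_ ?_
        · rw [w_flags]
          exact w_df_1090d2
        · rw [w_mxcsr]
          exact hmx
      · simp only [List.forall_mem_cons, List.not_mem_nil, false_imp_iff, implies_true, and_true]
        omega
      · rw [hrem]
        exact Nat.le_refl _
    have hr13 : (s_1090de.reg .r13).toNat % 2 ^ 32 = 0 := by
      rw [w_r13, ha0]
    refine ReachVia.done (Or.inr ⟨hbody1, Or.inr hr13, ?_⟩)
    intro h1
    rw [hr13] at h1
    exact absurd h1 (by decide)
  · -- 0x108ffe FROM 0x108ff8: THE MAP IS ADOPTED, `i = 0`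
    have ha0 : ¬ a.toNat = 0 := hbr_108ff2
    rcases hres with h0 | ⟨colors, count, howns', hcc, hcol, c1, c256⟩
    · exact absurd h0 ha0
    have hs : Mem.SameExcept [⟨(e.reg .rsp).toNat - 448, (e.reg .rsp).toNat - 136⟩, ⟨F.gif + 64, F.gif + 72⟩]
        v.mem s_108ff8.mem := by
      rw [w_mem]
      u_same
    have hinv1 := hbody.inv.writeLE_out (e.reg .rsp - 144) 8 1085419 (by u_omega) (Or.inl (by rw [hbase]; u_omega))
      (Or.inl (by u_omega))
    have hinv2 := hinv1.writeLE_live hlg (e.reg .rdi + 64) 8 a.toNat (by u_omega) (by u_omega)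
    rw [← w_mem] at hinv2
    -- where the new object is: owned together with gif, so 64 bytes away from it
    have hamem : (a.toNat, 24) ∈ ({ Fc with icm := some ⟨a.toNat, colors, count⟩ } : Forest).owned :=
      Forest.mem_owned_icm List.mem_cons_self
    have hgmem' : (F.gif, 120) ∈ ({ Fc with icm := some ⟨a.toNat, colors, count⟩ } : Forest).owned := by
      rw [← hgF]
      exact List.mem_cons_self
    have hain := howns'.inside hbody.inv.heap (o := (a.toNat, 24)) hamem
    simp only at hain
    rw [hbase] at hain
    have hain1 := hain.1
    have hain2 := hain.2.2.2.2
    clear hain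
    have hfar := howns'.far hbody.inv.heap hgmem' hamem (by
      intro hx
      have hx2 := congrArg Prod.snd hx
      simp only at hx2
      omega)
    simp only at hfar
    have hshape : Shape { Fc with icm := some ⟨a.toNat, colors, count⟩ } R s_108ff8.mem := by
      apply Shape.set_icm hbody.ok.shape (hbody.ok.owns.placed hbody.inv.heap) hbody.inv.heap ⟨hcur.1, hcur.2.1⟩ hs
      · simp only [List.forall_mem_cons, List.not_mem_nil, false_imp_iff, implies_true, and_true]
        refine ⟨Or.inl ?_, Or.inr ?_⟩
        · apply Loose.stack hbody.inv.heap
          · simp only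
            omega
          · simp only
            omega
          · simp only
            omega
        · omega
      · have hptr : GifFileType.Image.ColorMap s_108ff8.mem Fc.gif = a.toNat := by
          simp only [gfield]
          rw [hgF, w_mem]
          rw [rd_writeLE_same _ (e.reg .rdi + 64) 8 a.toNat _ (by u_omega) (by decide)]
          have hlt := a.toNat_lt
          omega
        rw [hptr]
        apply MapAt.intro (m := ⟨a.toNat, colors, count⟩)
        · simp only [gfield] at hcc ⊢
          rw [hs.rd _ _ (by omega) ?_]
          · exact hcc
          · simp only [List.forall_mem_cons, List.not_mem_nil, false_imp_iff, implies_true, and_true]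
            omega
        · simp only [gfield] at hcol ⊢
          rw [hs.rd _ _ (by omega) ?_]
          · exact hcol
          · simp only [List.forall_mem_cons, List.not_mem_nil, false_imp_iff, implies_true, and_true]
            omega
        · exact c1
        · exact c256
    have hrem : rem R s_108ff8.mem = rem R v.mem := by
      apply rem_sameExcept hs (by omega)
      simp only [List.forall_mem_cons, List.not_mem_nil, false_imp_iff, implies_true, and_true]
      omega
    have hfor : F.SameButIcm { Fc with icm := some ⟨a.toNat, colors, count⟩ } := hbody.forest
    have hbody1 : DGifGetImageHeader.Body Gif.L.DGifGetImageHeader.at_108ffe H rest frames F R Hc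
        { Fc with icm := some ⟨a.toNat, colors, count⟩ } u₀ e ret s_108ff8 := by
      refine dgih3_body_carry hbody w_rip w_rsp (w_kept.get .rbx rfl) (w_kept.get .rbp rfl) (ProgX.Base.conv_code_in w_eq) ?_ hs ?_
        hinv2 hbody.region hfor ⟨howns', hshape⟩ ?_
      · refine ProgX.Base.abiInv_of ?_ ?_
        · rw [w_flags]
          simp only [X86.User.df_setStatus]
          exact w_df_108fe6
        · rw [w_mxcsr]
          exact hmx
      · simp only [List.forall_mem_cons, List.not_mem_nil, false_imp_iff, implies_true, and_true]
        omega
      · rw [hrem]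
        exact Nat.le_refl _
    have hr14 : (s_108ff8.reg .r14).toNat = 0 := by
      rw [w_r14]
      decide
    refine ReachVia.done (Or.inl ⟨{ Fc with icm := some ⟨a.toNat, colors, count⟩ }, count, ?_⟩)
    refine ⟨⟨hbody1, ?_⟩, ⟨a.toNat, colors, count⟩, rfl, ?_, ?_⟩
    · rw [w_kept.get .r12 rfl]
      exact c_r12
    · rw [hr14]
      exact Nat.zero_le _
    · rw [hr14]
      rfl

end Gif.Spec.DGifGetImageHeader_3
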